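-- pv_equiv track=rewrite | github.com/Crunchies1/advent_of_code_2024 | q11/q11_2.py | evolve_stones_refined
-- ===== SOURCE A (Python) =====
-- def evolve_stones(stone_list: list[int], stone_memo: dict[int, list[int]]) -> list[int]:
--     new_stone_list: list[int] = []
--     for stone_idx in range(len(stone_list)):
--         # Check if stone has been evolved before, if so we use that
--         stone = stone_list[stone_idx]
--         if stone in stone_memo:
--             new_stone_list.extend(stone_memo[stone])
--             continue
--
--         # Evolve the stone and record it in the memo
--         if stone == 0:
--             new_stone_list.append(1)
--             stone_memo[stone] = [1]
--         elif len(str(stone)) % 2 == 0: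
--             left_val = int(str(stone)[:len(str(stone))//2])
--             right_val = int(str(stone)[len(str(stone))//2:])
--             new_stone_list.append(left_val)
--             new_stone_list.append(right_val)
--             stone_memo[stone] = [left_val, right_val]
--         else:
--             next_val = stone * 2024
--             new_stone_list.append(next_val)
--             stone_memo[stone] = [next_val]
--
--     return new_stone_list
--
-- def evolve_stones_refined(stone_list: list[int], stone_memo: dict[int, list[int]], prebuilt_memo: dict[int, list[int]], blink_num: int) -> tuple[list[int], int]:
--     new_stone_list: list[int] = evolve_stones(stone_list, stone_memo)
--     extra_stones: int = 0
--
--     to_remove: set[int] = set()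
--     for stone in new_stone_list:
--         if stone in prebuilt_memo:
--             to_remove.add(stone)
--             extra_stones += prebuilt_memo[stone][74 - blink_num]
--
--     return [stone for stone in new_stone_list if stone not in to_remove], extra_stones
-- ===== SOURCE B (Python) =====
-- # Three-phase by distinct stones instead of build-then-filter: (1) complete
-- # stone_memo for every distinct stone (same in-place mutation as the original),
-- # (2) build a routing table (kept values, extra count) once per DISTINCT stone,
-- # (3) assemble the answer by concatenating cached entries.
-- def evolve_stones_refined(stone_list, stone_memo, prebuilt_memo, blink_num):
--     idx = 74 - blink_num
--     # Phase 1: complete the memo in first-occurrence order.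
--     for stone in stone_list:
--         if stone not in stone_memo:
--             if stone == 0:
--                 stone_memo[stone] = [1]
--             else:
--                 s = str(stone)
--                 h = len(s) // 2
--                 if len(s) % 2 == 0:
--                     stone_memo[stone] = [int(s[:h]), int(s[h:])]
--                 else:
--                     stone_memo[stone] = [stone * 2024]
--     # Phase 2: routing table, one entry per distinct stone.
--     route = {}
--     for stone in set(stone_list):
--         kept = []
--         extra = 0
--         for v in stone_memo[stone]:
--             if v in prebuilt_memo:
--                 extra += prebuilt_memo[v][idx]
--             else:
--                 kept.append(v)
--         route[stone] = (kept, extra)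
--     # Phase 3: assemble.
--     out = []
--     total = 0
--     for stone in stone_list:
--         kept, extra = route[stone]
--         out.extend(kept)
--         total += extra
--     return out, total
-- ===== Notes on version B (the rewrite author's own statement) =====
-- stated objective: alternative
-- what changed: A interleaves memoization with building the full evolved list, then scans it into a to_remove set and finally filters; B works by distinct stones: it first completes stone_memo, then builds a routing table mapping each distinct stone to its (kept values, extra count) pair once, and assembles the answer by concatenating cached table entries, so the split/filter work is done once per distinct stone instead of once per occurrence.
import Mathlib
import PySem

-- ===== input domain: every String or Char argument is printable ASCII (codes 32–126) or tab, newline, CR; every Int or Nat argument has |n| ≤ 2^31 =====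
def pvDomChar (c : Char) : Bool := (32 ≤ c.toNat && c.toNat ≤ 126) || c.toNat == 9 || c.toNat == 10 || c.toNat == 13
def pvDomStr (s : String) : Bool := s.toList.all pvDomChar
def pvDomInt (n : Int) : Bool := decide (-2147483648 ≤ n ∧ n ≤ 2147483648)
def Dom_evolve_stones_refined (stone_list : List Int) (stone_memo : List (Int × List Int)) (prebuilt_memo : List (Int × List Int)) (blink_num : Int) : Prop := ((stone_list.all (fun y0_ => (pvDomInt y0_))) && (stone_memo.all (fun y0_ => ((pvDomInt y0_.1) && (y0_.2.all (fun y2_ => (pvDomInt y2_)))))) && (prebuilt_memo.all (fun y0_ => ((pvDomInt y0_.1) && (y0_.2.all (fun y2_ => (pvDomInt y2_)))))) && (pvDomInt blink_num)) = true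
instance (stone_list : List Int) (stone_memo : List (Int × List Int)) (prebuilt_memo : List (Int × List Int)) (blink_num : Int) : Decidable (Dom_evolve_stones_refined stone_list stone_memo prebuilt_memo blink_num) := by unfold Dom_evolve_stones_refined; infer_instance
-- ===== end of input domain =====

-- B replaces A's build-full-list / scan-into-a-set / filter pipeline by a per-DISTINCT-stone scheme:
-- complete the memo, build a routing table (kept values, extra count) once per distinct stone, then
-- assemble the answer by concatenating cached table entries (objective: alternative).  Both Pythons
-- mutate stone_memo identically in place; the equivalence proved here is about the RETURN value.

-- ===== PORT A =====
-- one new stone's evolution, exactly A's `if stone == 0 / elif len(str) even / else` chain;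
-- none = the ValueError of int('-') on stones -9..-1 (excluded by Pre_)
def pvEvolveA (stone : Int) : Option (List Int) :=
  if stone = 0 then some [1]
  else
    if PySem.Int.mod ((PySem.Int.toChars stone).length : Int) 2 = 0 then
      match PySem.Int.ofChars? (PySem.List.slice (PySem.Int.toChars stone) none
              (some (PySem.Int.floordiv ((PySem.Int.toChars stone).length : Int) 2))),
            PySem.Int.ofChars? (PySem.List.slice (PySem.Int.toChars stone)
              (some (PySem.Int.floordiv ((PySem.Int.toChars stone).length : Int) 2)) none) with
      | some l, some r => some [l, r]
      | _, _ => none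
    else some [stone * 2024]

-- the `evolve_stones` helper: loop over stone_list extending new_stone_list, memoizing new stones
def pvEvolveStonesA : List Int → PySem.Dict Int (List Int) → Option (List Int)
  | [], _ => some []
  | stone :: rest, memo =>
    match memo.get? stone with
    | some vals => (pvEvolveStonesA rest memo).map (fun l => vals ++ l)
    | none =>
      match pvEvolveA stone with
      | none => none
      | some vals => (pvEvolveStonesA rest (memo.insert stone vals)).map (fun l => vals ++ l)

-- A's second loop: build to_remove and extra_stones; none = IndexError of prebuilt_memo[v][74-blink]
def pvCollectA (prebuilt : PySem.Dict Int (List Int)) (idx : Int) :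
    List Int → PySem.Set Int → Int → Option (PySem.Set Int × Int)
  | [], toRemove, extra => some (toRemove, extra)
  | stone :: rest, toRemove, extra =>
    match prebuilt.get? stone with
    | none => pvCollectA prebuilt idx rest toRemove extra
    | some hit =>
      match PySem.List.pyGet? hit idx with
      | none => none
      | some x => pvCollectA prebuilt idx rest (PySem.Set.add toRemove stone) (extra + x)

def evolve_stones_refined (stone_list : List Int) (stone_memo : List (Int × List Int)) (prebuilt_memo : List (Int × List Int)) (blink_num : Int) : List Int × Int :=
  match pvEvolveStonesA stone_list (PySem.Dict.ofList stone_memo) with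
  | none => ([], 0)      -- Python raises ValueError here; outside Pre_
  | some newList =>
    match pvCollectA (PySem.Dict.ofList prebuilt_memo) (74 - blink_num) newList PySem.Set.empty 0 with
    | none => ([], 0)    -- Python raises IndexError here; outside Pre_
    | some (toRemove, extra) =>
      (newList.filter (fun stone => !(PySem.Set.contains toRemove stone)), extra)

-- ===== PORT B =====
-- Source B phase 1: the evolution of one unmemoized stone (stone==0 / even / else chain)
def pvEvolveB (stone : Int) : Option (List Int) :=
  if stone = 0 then some [1]
  else
    if PySem.Int.mod ((PySem.Int.toChars stone).length : Int) 2 = 0 then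
      match PySem.Int.ofChars? (PySem.List.slice (PySem.Int.toChars stone) none
              (some (PySem.Int.floordiv ((PySem.Int.toChars stone).length : Int) 2))),
            PySem.Int.ofChars? (PySem.List.slice (PySem.Int.toChars stone)
              (some (PySem.Int.floordiv ((PySem.Int.toChars stone).length : Int) 2)) none) with
      | some l, some r => some [l, r]
      | _, _ => none
    else some [stone * 2024]

-- Source B phase 1 loop: complete the memo for every stone of the list (first-occurrence order)
def pvComplete : List Int → PySem.Dict Int (List Int) → Option (PySem.Dict Int (List Int))
  | [], memo => some memo
  | stone :: rest, memo =>
    match memo.get? stone with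
    | some _ => pvComplete rest memo
    | none =>
      match pvEvolveB stone with
      | none => none
      | some vals => pvComplete rest (memo.insert stone vals)

-- Source B phase 2 inner loop: split one memo entry into (kept values, extra count)
def pvRouteOne (prebuilt : PySem.Dict Int (List Int)) (idx : Int) :
    List Int → List Int → Int → Option (List Int × Int)
  | [], kept, extra => some (kept, extra)
  | v :: t, kept, extra =>
    match prebuilt.get? v with
    | none => pvRouteOne prebuilt idx t (kept ++ [v]) extra
    | some hit =>
      match PySem.List.pyGet? hit idx with
      | none => none
      | some x => pvRouteOne prebuilt idx t kept (extra + x)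

-- Source B phase 2 outer loop: one routing-table entry per distinct stone
def pvBuildRoute (memo prebuilt : PySem.Dict Int (List Int)) (idx : Int) :
    List Int → PySem.Dict Int (List Int × Int) → Option (PySem.Dict Int (List Int × Int))
  | [], route => some route
  | stone :: rest, route =>
    match memo.get? stone with
    | none => none      -- KeyError; unreachable after pvComplete
    | some vals =>
      match pvRouteOne prebuilt idx vals [] 0 with
      | none => none
      | some pr => pvBuildRoute memo prebuilt idx rest (route.insert stone pr)

-- Source B phase 3: assemble by concatenating cached entries
def pvAssemble (route : PySem.Dict Int (List Int × Int)) :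
    List Int → List Int → Int → Option (List Int × Int)
  | [], out, total => some (out, total)
  | stone :: rest, out, total =>
    match route.get? stone with
    | none => none      -- KeyError; unreachable
    | some (kept, extra) => pvAssemble route rest (out ++ kept) (total + extra)

def evolve_stones_refined_alt (stone_list : List Int) (stone_memo : List (Int × List Int)) (prebuilt_memo : List (Int × List Int)) (blink_num : Int) : List Int × Int :=
  match pvComplete stone_list (PySem.Dict.ofList stone_memo) with
  | none => ([], 0)      -- Python raises ValueError here; outside Pre_
  | some memo' =>
    match pvBuildRoute memo' (PySem.Dict.ofList prebuilt_memo) (74 - blink_num)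
            (PySem.Set.ofList stone_list) PySem.Dict.empty with
    | none => ([], 0)    -- Python raises here; outside Pre_
    | some route =>
      match pvAssemble route stone_list [] 0 with
      | none => ([], 0)  -- unreachable
      | some res => res

-- ===== PRECONDITION & SPEC =====
-- the values one occurrence of stone s contributes: the memoized list if present, else its evolution
def pvVals (memo : PySem.Dict Int (List Int)) (s : Int) : Option (List Int) :=
  match memo.get? s with
  | some v => some v
  | none => pvEvolveA s

-- true iff looking v up in prebuilt_memo and indexing at idx cannot raise IndexError
def pvHitOK (prebuilt : PySem.Dict Int (List Int)) (idx : Int) (v : Int) : Bool :=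
  match prebuilt.get? v with
  | none => true
  | some hit => (PySem.List.pyGet? hit idx).isSome

-- Exactly the inputs where Python A returns: no stone is an unmemoized -9..-1 (whose even-length
-- str(stone) makes int('-') raise ValueError — pvVals = none there), and every produced value that
-- hits prebuilt_memo has 74 - blink_num as a valid Python index into its list (else IndexError).
def Pre_evolve_stones_refined (stone_list : List Int) (stone_memo : List (Int × List Int)) (prebuilt_memo : List (Int × List Int)) (blink_num : Int) : Prop :=
  ∀ s ∈ stone_list,
    pvVals (PySem.Dict.ofList stone_memo) s ≠ none ∧
    ∀ v ∈ (pvVals (PySem.Dict.ofList stone_memo) s).getD [],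
      pvHitOK (PySem.Dict.ofList prebuilt_memo) (74 - blink_num) v = true
instance (stone_list : List Int) (stone_memo : List (Int × List Int)) (prebuilt_memo : List (Int × List Int)) (blink_num : Int) : Decidable (Pre_evolve_stones_refined stone_list stone_memo prebuilt_memo blink_num) := by unfold Pre_evolve_stones_refined; infer_instance

def pvWitness_evolve_stones_refined : List Int × (List (Int × List Int)) × (List (Int × List Int)) × Int :=
  ([0, 10], [], [(1, [5, 3])], 73)

def Spec_evolve_stones_refined (stone_list : List Int) (stone_memo : List (Int × List Int)) (prebuilt_memo : List (Int × List Int)) (blink_num : Int) (out : List Int × Int) : Prop := out = evolve_stones_refined_alt stone_list stone_memo prebuilt_memo blink_num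
instance (stone_list : List Int) (stone_memo : List (Int × List Int)) (prebuilt_memo : List (Int × List Int)) (blink_num : Int) (out : List Int × Int) : Decidable (Spec_evolve_stones_refined stone_list stone_memo prebuilt_memo blink_num out) := by unfold Spec_evolve_stones_refined; infer_instance

-- ===== CLAIM (what is proved, stated in full; the proofs are below) =====
def Claim_equal_evolve_stones_refined : Prop := ∀ (stone_list : List Int) (stone_memo : List (Int × List Int)) (prebuilt_memo : List (Int × List Int)) (blink_num : Int), Dom_evolve_stones_refined stone_list stone_memo prebuilt_memo blink_num → Pre_evolve_stones_refined stone_list stone_memo prebuilt_memo blink_num → Spec_evolve_stones_refined stone_list stone_memo prebuilt_memo blink_num (evolve_stones_refined stone_list stone_memo prebuilt_memo blink_num)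

-- ===== LEMMAS AND PROOFS =====

-- the contribution of one produced value to extra_stones (0 when it misses prebuilt_memo)
def pvExOf (P : PySem.Dict Int (List Int)) (idx : Int) (v : Int) : Int :=
  match P.get? v with
  | none => 0
  | some hit => (PySem.List.pyGet? hit idx).getD 0

def pvSumX (P : PySem.Dict Int (List Int)) (idx : Int) (L : List Int) : Int :=
  (L.map (pvExOf P idx)).sum

-- the two one-stone evolutions are the same function
theorem pvEvolveB_eq (stone : Int) : pvEvolveB stone = pvEvolveA stone := rfl

-- inserting a stone's own evolution does not change pvVals anywhere
theorem pvVals_insert (M : PySem.Dict Int (List Int)) (s : Int) (vs : List Int)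
    (h0 : M.get? s = none) (h1 : pvEvolveA s = some vs) (t : Int) :
    pvVals (M.insert s vs) t = pvVals M t := by
  unfold pvVals
  rw [PySem.Dict.get?_insert]
  by_cases ht : t = s
  · subst ht; rw [h0, h1]; simp
  · simp [ht]

-- A's evolve loop returns the flatMap of pvVals
theorem pvEvolveStonesA_eq (L : List Int) (M : PySem.Dict Int (List Int))
    (h : ∀ s ∈ L, pvVals M s ≠ none) :
    pvEvolveStonesA L M = some (L.flatMap (fun s => (pvVals M s).getD [])) := by
  induction L generalizing M with
  | nil => simp [pvEvolveStonesA]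
  | cons s rest ih =>
    have hs := (h s (List.mem_cons_self)).symm
    cases hm : M.get? s with
    | some vals =>
      have hv : pvVals M s = some vals := by unfold pvVals; rw [hm]
      simp only [pvEvolveStonesA, hm,
        ih M (fun t ht => h t (List.mem_cons_of_mem _ ht))]
      simp [List.flatMap_cons, hv]
    | none =>
      have hv : pvVals M s = pvEvolveA s := by unfold pvVals; rw [hm]
      cases he : pvEvolveA s with
      | none => exact absurd (hv.trans he) (h s List.mem_cons_self)
      | some vals =>
        have hstab := pvVals_insert M s vals hm he
        have hrest : ∀ t ∈ rest, pvVals (M.insert s vals) t ≠ none := by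
          intro t ht; rw [hstab]; exact h t (List.mem_cons_of_mem _ ht)
        simp only [pvEvolveStonesA, hm, he, ih _ hrest]
        have : (fun t => (pvVals (M.insert s vals) t).getD []) =
            (fun t => (pvVals M t).getD []) := by
          funext t; rw [hstab]
        rw [this]
        simp [List.flatMap_cons, hv, he]

-- A's collect loop succeeds under pvHitOK, accumulates pvSumX, and its set is characterised
theorem pvCollectA_ok (P : PySem.Dict Int (List Int)) (idx : Int) :
    ∀ (L : List Int) (S : PySem.Set Int) (e : Int),
    (∀ v ∈ L, pvHitOK P idx v = true) →
    ∃ S', pvCollectA P idx L S e = some (S', e + pvSumX P idx L) ∧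
      ∀ v, (v ∈ S' ↔ v ∈ S ∨ (v ∈ L ∧ (P.get? v).isSome)) := by
  intro L
  induction L with
  | nil => intro S e _; exact ⟨S, by simp [pvCollectA, pvSumX], by simp⟩
  | cons w t ih =>
    intro S e h
    cases hp : P.get? w with
    | none =>
      obtain ⟨S', h1, h2⟩ := ih S e (fun v hv => h v (List.mem_cons_of_mem _ hv))
      refine ⟨S', ?_, ?_⟩
      · simp only [pvCollectA, hp, h1, Option.some.injEq, Prod.mk.injEq, true_and]
        simp [pvSumX, pvExOf, hp]
      · intro v
        rw [h2 v]
        constructor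
        · rintro (hs | ⟨hm, hh⟩); · exact Or.inl hs
          · exact Or.inr ⟨List.mem_cons_of_mem _ hm, hh⟩
        · rintro (hs | ⟨hm, hh⟩); · exact Or.inl hs
          · rcases List.mem_cons.mp hm with rfl | hm'
            · rw [hp] at hh; simp at hh
            · exact Or.inr ⟨hm', hh⟩
    | some hit =>
      have hok : (PySem.List.pyGet? hit idx).isSome = true := by
        simpa [pvHitOK, hp] using h w List.mem_cons_self
      cases hg : PySem.List.pyGet? hit idx with
      | none => rw [hg] at hok; simp at hok
      | some x =>
        obtain ⟨S', h1, h2⟩ :=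
          ih (PySem.Set.add S w) (e + x) (fun v hv => h v (List.mem_cons_of_mem _ hv))
        refine ⟨S', ?_, ?_⟩
        · simp only [pvCollectA, hp, hg, h1, Option.some.injEq, Prod.mk.injEq, true_and]
          simp only [pvSumX, List.map_cons, List.sum_cons, pvExOf, hp, hg, Option.getD_some]
          ring
        · intro v
          rw [h2 v, PySem.Set.mem_add]
          constructor
          · rintro ((hs | rfl) | ⟨hm, hh⟩)
            · exact Or.inl hs
            · exact Or.inr ⟨List.mem_cons_self, by simp [hp]⟩
            · exact Or.inr ⟨List.mem_cons_of_mem _ hm, hh⟩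
          · rintro (hs | ⟨hm, hh⟩)
            · exact Or.inl (Or.inl hs)
            · rcases List.mem_cons.mp hm with rfl | hm'
              · exact Or.inl (Or.inr rfl)
              · exact Or.inr ⟨hm', hh⟩

-- filter distributes over flatMap
theorem pvFilterFlatMap (L : List Int) (f : Int → List Int) (p : Int → Bool) :
    (L.flatMap f).filter p = L.flatMap (fun s => (f s).filter p) := by
  induction L with
  | nil => simp
  | cons s t ih => simp [List.flatMap_cons, List.filter_append, ih]

-- pvSumX distributes over flatMap
theorem pvSumXFlatMap (P : PySem.Dict Int (List Int)) (idx : Int)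
    (L : List Int) (f : Int → List Int) :
    pvSumX P idx (L.flatMap f) = (L.map (fun s => pvSumX P idx (f s))).sum := by
  induction L with
  | nil => simp [pvSumX]
  | cons s t ih => simp [pvSumX, List.flatMap_cons, List.map_append, List.sum_append] at *; rw [ih]

-- B's completion loop: succeeds, preserves existing entries, preserves pvVals, defines it on L
theorem pvComplete_ok :
    ∀ (L : List Int) (M : PySem.Dict Int (List Int)),
    (∀ s ∈ L, pvVals M s ≠ none) →
    ∃ M', pvComplete L M = some M' ∧
      (∀ t v, M.get? t = some v → M'.get? t = some v) ∧
      (∀ t, pvVals M' t = pvVals M t) ∧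
      (∀ s ∈ L, M'.get? s = pvVals M s) := by
  intro L
  induction L with
  | nil => intro M _; exact ⟨M, by simp [pvComplete], fun _ _ h => h, fun _ => rfl, by simp⟩
  | cons s rest ih =>
    intro M h
    cases hm : M.get? s with
    | some vals =>
      obtain ⟨M', h1, h2, h3, h4⟩ := ih M (fun t ht => h t (List.mem_cons_of_mem _ ht))
      refine ⟨M', by simp [pvComplete, hm, h1], h2, h3, ?_⟩
      intro t ht
      rcases List.mem_cons.mp ht with rfl | ht'
      · rw [h2 t vals hm]; unfold pvVals; rw [hm]
      · exact h4 t ht'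
    | none =>
      have hv : pvVals M s = pvEvolveA s := by unfold pvVals; rw [hm]
      cases he : pvEvolveA s with
      | none => exact absurd (hv.trans he) (h s List.mem_cons_self)
      | some vals =>
        have hstab := pvVals_insert M s vals hm he
        obtain ⟨M', h1, h2, h3, h4⟩ := ih (M.insert s vals)
          (fun t ht => by rw [hstab]; exact h t (List.mem_cons_of_mem _ ht))
        refine ⟨M', ?_, ?_, ?_, ?_⟩
        · simp [pvComplete, hm, pvEvolveB_eq, he, h1]
        · intro t v htv
          have hts : t ≠ s := by rintro rfl; rw [hm] at htv; simp at htv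
          exact h2 t v (by rw [PySem.Dict.get?_insert]; simp [hts, htv])
        · intro t; rw [h3 t, hstab]
        · intro t ht
          rcases List.mem_cons.mp ht with rfl | ht'
          · rw [h2 t vals (by rw [PySem.Dict.get?_insert]; simp), hv, he]
          · rw [h4 t ht', hstab]

-- B's inner routing loop computes (filter, pvSumX) when indexing cannot fail
theorem pvRouteOne_ok (P : PySem.Dict Int (List Int)) (idx : Int) :
    ∀ (vs kept : List Int) (extra : Int),
    (∀ v ∈ vs, pvHitOK P idx v = true) →
    pvRouteOne P idx vs kept extra =
      some (kept ++ vs.filter (fun v => (P.get? v).isNone), extra + pvSumX P idx vs) := by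
  intro vs
  induction vs with
  | nil => intro kept extra _; simp [pvRouteOne, pvSumX]
  | cons v t ih =>
    intro kept extra h
    cases hp : P.get? v with
    | none =>
      rw [show pvRouteOne P idx (v :: t) kept extra
            = pvRouteOne P idx t (kept ++ [v]) extra by simp [pvRouteOne, hp],
          ih _ _ (fun w hw => h w (List.mem_cons_of_mem _ hw))]
      simp [hp, pvSumX, pvExOf]
    | some hit =>
      have hok : (PySem.List.pyGet? hit idx).isSome = true := by
        simpa [pvHitOK, hp] using h v List.mem_cons_self
      cases hg : PySem.List.pyGet? hit idx with
      | none => rw [hg] at hok; simp at hok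
      | some x =>
        rw [show pvRouteOne P idx (v :: t) kept extra
              = pvRouteOne P idx t kept (extra + x) by simp [pvRouteOne, hp, hg],
            ih _ _ (fun w hw => h w (List.mem_cons_of_mem _ hw))]
        simp only [List.filter_cons, hp, Option.isNone_some, Bool.false_eq_true, reduceIte,
          Option.some.injEq, Prod.mk.injEq, true_and,
          pvSumX, List.map_cons, List.sum_cons, pvExOf, hg, Option.getD_some]
        ring

-- B's routing-table loop: every stone of D gets its (filter, pvSumX) entry
theorem pvBuildRoute_ok (M' P : PySem.Dict Int (List Int)) (idx : Int)
    (f : Int → List Int) :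
    ∀ (D : List Int) (R0 : PySem.Dict Int (List Int × Int)),
    (∀ s ∈ D, M'.get? s = some (f s) ∧ ∀ v ∈ f s, pvHitOK P idx v = true) →
    ∃ R, pvBuildRoute M' P idx D R0 = some R ∧
      ∀ t, R.get? t = if t ∈ D then
          some ((f t).filter (fun v => (P.get? v).isNone), pvSumX P idx (f t))
        else R0.get? t := by
  intro D
  induction D with
  | nil => intro R0 _; exact ⟨R0, rfl, by simp⟩
  | cons s rest ih =>
    intro R0 h
    obtain ⟨hm, hok⟩ := h s List.mem_cons_self
    obtain ⟨R, h1, h2⟩ := ih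
      (R0.insert s ((f s).filter (fun v => (P.get? v).isNone), pvSumX P idx (f s)))
      (fun t ht => h t (List.mem_cons_of_mem _ ht))
    refine ⟨R, ?_, ?_⟩
    · simp [pvBuildRoute, hm, pvRouteOne_ok P idx (f s) [] 0 hok, h1]
    · intro t
      rw [h2 t, PySem.Dict.get?_insert]
      by_cases h3 : t ∈ rest
      · simp [h3, List.mem_cons_of_mem _ h3]
      · by_cases h4 : t = s
        · subst h4; simp [h3]
        · simp [h3, h4]

-- B's assembly loop concatenates first components and sums second components
theorem pvAssemble_ok (R : PySem.Dict Int (List Int × Int)) (g : Int → List Int × Int) :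
    ∀ (L out : List Int) (total : Int),
    (∀ s ∈ L, R.get? s = some (g s)) →
    pvAssemble R L out total =
      some (out ++ L.flatMap (fun s => (g s).1), total + (L.map (fun s => (g s).2)).sum) := by
  intro L
  induction L with
  | nil => intro out total _; simp [pvAssemble]
  | cons s rest ih =>
    intro out total h
    rw [show pvAssemble R (s :: rest) out total
          = pvAssemble R rest (out ++ (g s).1) (total + (g s).2) by
        simp [pvAssemble, h s List.mem_cons_self],
        ih _ _ (fun t ht => h t (List.mem_cons_of_mem _ ht))]
    simp only [List.flatMap_cons, List.map_cons, List.sum_cons, Option.some.injEq,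
      Prod.mk.injEq]
    constructor
    · simp [List.append_assoc]
    · ring

theorem evolve_stones_refined_eq (stone_list : List Int) (stone_memo : List (Int × List Int))
    (prebuilt_memo : List (Int × List Int)) (blink_num : Int)
    (hpre : Pre_evolve_stones_refined stone_list stone_memo prebuilt_memo blink_num) :
    evolve_stones_refined stone_list stone_memo prebuilt_memo blink_num =
      evolve_stones_refined_alt stone_list stone_memo prebuilt_memo blink_num := by
  unfold Pre_evolve_stones_refined at hpre
  unfold evolve_stones_refined evolve_stones_refined_alt
  have hvne : ∀ s ∈ stone_list, pvVals (PySem.Dict.ofList stone_memo) s ≠ none :=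
    fun s hs => (hpre s hs).1
  -- notation
  have hA := pvEvolveStonesA_eq stone_list (PySem.Dict.ofList stone_memo) hvne
  simp only [hA]
  have hNok : ∀ v ∈ stone_list.flatMap
      (fun s => (pvVals (PySem.Dict.ofList stone_memo) s).getD []),
      pvHitOK (PySem.Dict.ofList prebuilt_memo) (74 - blink_num) v = true := by
    intro v hv
    obtain ⟨s, hs, hv'⟩ := List.mem_flatMap.mp hv
    exact (hpre s hs).2 v hv'
  obtain ⟨S', hC, hCm⟩ := pvCollectA_ok (PySem.Dict.ofList prebuilt_memo) (74 - blink_num)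
    (stone_list.flatMap (fun s => (pvVals (PySem.Dict.ofList stone_memo) s).getD []))
    PySem.Set.empty 0 hNok
  simp only [hC]
  -- B side
  obtain ⟨M', hB1, _, _, hB4⟩ := pvComplete_ok stone_list (PySem.Dict.ofList stone_memo) hvne
  simp only [hB1]
  have hD : ∀ s ∈ PySem.Set.ofList stone_list,
      M'.get? s = some ((pvVals (PySem.Dict.ofList stone_memo) s).getD []) ∧
      ∀ v ∈ (pvVals (PySem.Dict.ofList stone_memo) s).getD [],
        pvHitOK (PySem.Dict.ofList prebuilt_memo) (74 - blink_num) v = true := by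
    intro s hs
    have hsl : s ∈ stone_list := (PySem.Set.mem_ofList _ _).mp hs
    refine ⟨?_, (hpre s hsl).2⟩
    have h1 := hB4 s hsl
    rcases ho : pvVals (PySem.Dict.ofList stone_memo) s with _ | vs
    · exact absurd ho (hvne s hsl)
    · rw [ho] at h1; simpa using h1
  obtain ⟨R, hR1, hR2⟩ := pvBuildRoute_ok M' (PySem.Dict.ofList prebuilt_memo) (74 - blink_num)
    (fun s => (pvVals (PySem.Dict.ofList stone_memo) s).getD [])
    (PySem.Set.ofList stone_list) PySem.Dict.empty hD
  simp only [hR1]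
  have hRg : ∀ s ∈ stone_list, R.get? s =
      some (((pvVals (PySem.Dict.ofList stone_memo) s).getD []).filter
              (fun v => ((PySem.Dict.ofList prebuilt_memo).get? v).isNone),
            pvSumX (PySem.Dict.ofList prebuilt_memo) (74 - blink_num)
              ((pvVals (PySem.Dict.ofList stone_memo) s).getD [])) := by
    intro s hs
    rw [hR2 s]
    simp [(PySem.Set.mem_ofList _ _).mpr hs]
  simp only [pvAssemble_ok R _ stone_list [] 0 hRg]
  have hfil : ∀ v ∈ stone_list.flatMap
      (fun s => (pvVals (PySem.Dict.ofList stone_memo) s).getD []),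
      (!(PySem.Set.contains S' v))
        = ((PySem.Dict.ofList prebuilt_memo).get? v).isNone := by
    intro v hv
    have hmem := hCm v
    simp only [PySem.Set.empty, List.not_mem_nil, false_or] at hmem
    cases hp2 : (PySem.Dict.ofList prebuilt_memo).get? v with
    | none =>
      have hni : v ∉ S' := fun hin => by
        have := hmem.mp hin; rw [hp2] at this; simp at this
      simp [hni]
    | some hit =>
      have hin : v ∈ S' := hmem.mpr ⟨hv, by simp [hp2]⟩
      simp [hin]
  simp only [List.filter_congr hfil, List.nil_append]
  rw [pvFilterFlatMap, pvSumXFlatMap]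

-- ===== VERDICT (by name: the statement is the Claim_ definition above) =====
theorem evolve_stones_refined_spec : Claim_equal_evolve_stones_refined := by
  intro stone_list stone_memo prebuilt_memo blink_num _ hpre
  exact evolve_stones_refined_eq stone_list stone_memo prebuilt_memo blink_num hpre
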